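-- pv_equiv track=rewrite | github.com/Hsbtqemy/AGRAFES | src/multicorpus_engine/importers/docx_numbered_lines.py | _analyze_external_ids
-- ===== SOURCE A (Python) =====
-- def _analyze_external_ids(external_ids: list[int]) -> tuple[list[int], list[int], list[int]]:
--     """Return (duplicates, holes, non_monotonic) from a sequence of external_ids."""
--     seen: dict[int, int] = {}
--     duplicates: list[int] = []
--     non_monotonic: list[int] = []
--
--     for i, eid in enumerate(external_ids):
--         if eid in seen:
--             if eid not in duplicates:
--                 duplicates.append(eid)
--         seen[eid] = i
--         if i > 0 and eid <= external_ids[i - 1]: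
--             non_monotonic.append(eid)
--
--     # Holes: integers between min and max not present in the set
--     unique = sorted(set(external_ids))
--     holes: list[int] = []
--     if unique:
--         for expected in range(unique[0], unique[-1] + 1):
--             if expected not in set(external_ids):
--                 holes.append(expected)
--
--     return duplicates, holes, non_monotonic
-- ===== SOURCE B (Python) =====
-- def _analyze_external_ids(external_ids: list[int]) -> tuple[list[int], list[int], list[int]]:
--     """Return (duplicates, holes, non_monotonic) from a sequence of external_ids."""
--     count: dict[int, int] = {}
--     duplicates: list[int] = []
--     for eid in external_ids:
--         c = count.get(eid, 0) + 1
--         count[eid] = c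
--         if c == 2:
--             duplicates.append(eid)
--     non_monotonic = [b for a, b in zip(external_ids, external_ids[1:]) if b <= a]
--     unique = sorted(set(external_ids))
--     holes: list[int] = []
--     for lo, hi in zip(unique, unique[1:]):
--         holes.extend(range(lo + 1, hi))
--     return duplicates, holes, non_monotonic
-- ===== Notes on version B (the rewrite author's own statement) =====
-- stated objective: faster
-- what changed: Holes are produced by walking consecutive pairs of the sorted distinct ids and emitting each gap range directly, instead of scanning every integer from min to max and rebuilding a membership set on each iteration; duplicates come from an occurrence counter (appended when the count reaches 2) instead of a seen-index dict plus a linear 'not in duplicates' scan, and non_monotonic is a zip of adjacent pairs instead of index arithmetic.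
import Mathlib
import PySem

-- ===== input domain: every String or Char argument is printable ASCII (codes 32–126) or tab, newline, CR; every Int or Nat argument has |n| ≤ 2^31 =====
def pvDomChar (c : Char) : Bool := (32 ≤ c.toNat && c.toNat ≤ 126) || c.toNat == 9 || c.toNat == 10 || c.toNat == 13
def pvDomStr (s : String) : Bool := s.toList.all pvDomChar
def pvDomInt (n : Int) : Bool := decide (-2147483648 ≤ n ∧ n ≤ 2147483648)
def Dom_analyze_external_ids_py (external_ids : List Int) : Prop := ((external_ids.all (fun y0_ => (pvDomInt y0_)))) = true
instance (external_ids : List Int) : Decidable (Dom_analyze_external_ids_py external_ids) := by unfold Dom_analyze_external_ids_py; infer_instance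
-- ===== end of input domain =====

-- B walks the gaps between consecutive sorted distinct ids instead of scanning the whole min..max range
-- with a membership set rebuilt per step (faster), counts occurrences for duplicates, zips adjacent pairs
-- for non_monotonic; equivalence of the returned triple is proved for all inputs.


-- ===== PORT A =====
-- one iteration of A's 'for i, eid in enumerate(external_ids)' loop; state = (seen, duplicates, non_monotonic)
def stepA (xs : List Int) (st : PySem.Dict Int Int × List Int × List Int) (p : Int × Int) :
    PySem.Dict Int Int × List Int × List Int :=
  let dups := if st.1.contains p.2 then (if p.2 ∈ st.2.1 then st.2.1 else st.2.1 ++ [p.2]) else st.2.1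
  let seen := st.1.insert p.2 p.1
  let nm := if 0 < p.1 ∧ p.2 ≤ (PySem.List.pyGet? xs (p.1 - 1)).getD 0 then st.2.2 ++ [p.2] else st.2.2
  (seen, dups, nm)

def analyze_external_ids_py (external_ids : List Int) : List Int × List Int × List Int :=
  let st := (PySem.List.enumerate external_ids 0).foldl (stepA external_ids) (PySem.Dict.empty, ([], []))
  let unique := PySem.List.sorted (PySem.Set.ofList external_ids) (fun x => x) false
  let holes : List Int :=
    if unique ≠ [] then
      (PySem.List.pyRange ((PySem.List.pyGet? unique 0).getD 0)
          (((PySem.List.pyGet? unique (-1)).getD 0) + 1) 1).foldl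
        (fun acc expected => if expected ∈ PySem.Set.ofList external_ids then acc else acc ++ [expected]) []
    else []
  (st.2.1, holes, st.2.2)

-- ===== PORT B =====
-- one iteration of B's counting loop; state = (count, duplicates)
def stepB (st : PySem.Dict Int Int × List Int) (eid : Int) : PySem.Dict Int Int × List Int :=
  let c := st.1.getD eid 0 + 1
  (st.1.insert eid c, if c = 2 then st.2 ++ [eid] else st.2)

def analyze_external_ids_py_alt (external_ids : List Int) : List Int × List Int × List Int :=
  let cd := external_ids.foldl stepB (PySem.Dict.empty, [])
  let non_monotonic := ((external_ids.zip (PySem.List.slice external_ids (some 1) none)).filter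
      (fun q => decide (q.2 ≤ q.1))).map (·.2)
  let unique := PySem.List.sorted (PySem.Set.ofList external_ids) (fun x => x) false
  let holes := (unique.zip (PySem.List.slice unique (some 1) none)).foldl
      (fun acc q => acc ++ PySem.List.pyRange (q.1 + 1) q.2 1) []
  (cd.2, holes, non_monotonic)

-- ===== PRECONDITION & SPEC =====
def Spec_analyze_external_ids_py (external_ids : List Int) (out : List Int × List Int × List Int) : Prop := out = analyze_external_ids_py_alt external_ids
instance (external_ids : List Int) (out : List Int × List Int × List Int) : Decidable (Spec_analyze_external_ids_py external_ids out) := by unfold Spec_analyze_external_ids_py; infer_instance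

-- ===== CLAIM (what is proved, stated in full; the proofs are below) =====
def Claim_equal_analyze_external_ids_py : Prop := ∀ (external_ids : List Int), Dom_analyze_external_ids_py external_ids → Spec_analyze_external_ids_py external_ids (analyze_external_ids_py external_ids)

-- ===== LEMMAS AND PROOFS =====

-- the non_monotonic elements still to be appended when 'prev' is the last already-processed id
def nmRest : Option Int → List Int → List Int
  | _, [] => []
  | none, e :: t => nmRest (some e) t
  | some a, e :: t => (if e ≤ a then [e] else []) ++ nmRest (some e) t

theorem nmRest_some (s : List Int) : ∀ a : Int,
    nmRest (some a) s = (((a :: s).zip s).filter (fun q => decide (q.2 ≤ q.1))).map (·.2) := by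
  induction s with
  | nil => intro a; rfl
  | cons e t ih =>
    intro a
    simp only [nmRest, List.zip_cons_cons, List.filter_cons, ih e]
    by_cases h : e ≤ a <;> simp [h]

theorem nmRest_none (xs : List Int) :
    nmRest none xs = ((xs.zip xs.tail).filter (fun q => decide (q.2 ≤ q.1))).map (·.2) := by
  cases xs with
  | nil => rfl
  | cons e t => simpa [nmRest] using nmRest_some t e

-- the combined A-loop, split into B's counting loop and the adjacent-pair scan
theorem loop_split : ∀ (s p : List Int) (seen : PySem.Dict Int Int) (dups nm : List Int)
    (cnt : PySem.Dict Int Int),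
    (∀ k : Int, seen.contains k = decide (k ∈ p)) →
    (∀ k : Int, k ∈ dups ↔ 2 ≤ p.count k) →
    (∀ k : Int, cnt.getD k 0 = (p.count k : Int)) →
    ((PySem.List.enumerate s (p.length : Int)).foldl (stepA (p ++ s)) (seen, (dups, nm))).2
      = ((s.foldl stepB (cnt, dups)).2, nm ++ nmRest p.getLast? s) := by
  intro s
  induction s with
  | nil => intro p seen dups nm cnt _ _ _; simp [nmRest]
  | cons e t ih =>
    intro p seen dups nm cnt hseen hdup hcnt
    have happ : p ++ e :: t = (p ++ [e]) ++ t := by simp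
    rw [PySem.List.enumerate_cons, List.foldl_cons, List.foldl_cons, happ]
    -- identify the new duplicates list on both sides
    have hdups_eq :
        (if seen.contains e then (if e ∈ dups then dups else dups ++ [e]) else dups)
          = (if cnt.getD e 0 + 1 = 2 then dups ++ [e] else dups) := by
      rw [hseen e, hcnt e]
      by_cases h1 : p.count e = 1
      · have hmem : e ∈ p := List.count_pos_iff.mp (by omega)
        have hnd : e ∉ dups := fun h => by have := (hdup e).mp h; omega
        have hc2 : ((p.count e : Int) + 1 = 2) := by omega
        simp [hmem, hnd, hc2]
      · by_cases h0 : p.count e = 0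
        · have hmem : e ∉ p := fun h => by have := List.count_pos_iff.mpr h; omega
          have hc2 : ¬ ((p.count e : Int) + 1 = 2) := by omega
          simp [hmem, hc2]
        · have hmem : e ∈ p := List.count_pos_iff.mp (by omega)
          have hd : e ∈ dups := (hdup e).mpr (by omega)
          have hc2 : ¬ ((p.count e : Int) + 1 = 2) := by omega
          simp [hmem, hd, hc2]
    -- the hypotheses for the extended prefix p ++ [e]
    have hseen' : ∀ k : Int, (seen.insert e (p.length : Int)).contains k = decide (k ∈ p ++ [e]) := by
      intro k
      rw [PySem.Dict.contains_insert, hseen k]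
      by_cases hk : k = e <;> simp [hk]
    have hdup' : ∀ k : Int,
        k ∈ (if cnt.getD e 0 + 1 = 2 then dups ++ [e] else dups) ↔ 2 ≤ (p ++ [e]).count k := by
      intro k
      rw [hcnt e]
      by_cases hk : k = e
      · subst hk
        have hca : (p ++ [k]).count k = p.count k + 1 := by simp [List.count_append]
        rw [hca]
        by_cases hc : (p.count k : Int) + 1 = 2
        · have h1 : p.count k = 1 := by omega
          simp [h1]
        · have h1 : p.count k ≠ 1 := by omega
          rw [if_neg hc, hdup k]
          omega
      · have hz : List.count k [e] = 0 := by rw [List.count_eq_zero]; simp [hk]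
        have hca : (p ++ [e]).count k = p.count k := by simp [List.count_append, hz]
        rw [hca]
        by_cases hc : (p.count e : Int) + 1 = 2 <;> simp [hc, hdup k, hk]
    have hcnt' : ∀ k : Int,
        (cnt.insert e (cnt.getD e 0 + 1)).getD k 0 = ((p ++ [e]).count k : Int) := by
      intro k
      rw [PySem.Dict.getD_insert, hcnt e]
      by_cases hk : k = e
      · subst hk; simp [List.count_append]
      · have hz : List.count k [e] = 0 := by rw [List.count_eq_zero]; simp [hk]
        simp [hk, List.count_append, hz, hcnt k]
    -- apply the induction hypothesis at prefix p ++ [e]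
    have hlen : (p.length : Int) + 1 = (((p ++ [e]).length : Nat) : Int) := by simp
    have hstep := ih (p ++ [e]) (seen.insert e (p.length : Int))
      (if cnt.getD e 0 + 1 = 2 then dups ++ [e] else dups)
      (if 0 < (p.length : Int) ∧
          e ≤ (PySem.List.pyGet? ((p ++ [e]) ++ t) ((p.length : Int) - 1)).getD 0
        then nm ++ [e] else nm)
      (cnt.insert e (cnt.getD e 0 + 1)) hseen' hdup' hcnt'
    rw [show (stepA ((p ++ [e]) ++ t) (seen, (dups, nm)) ((p.length : Int), e))
          = (seen.insert e (p.length : Int),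
             (if seen.contains e then (if e ∈ dups then dups else dups ++ [e]) else dups,
              if 0 < (p.length : Int) ∧
                  e ≤ (PySem.List.pyGet? ((p ++ [e]) ++ t) ((p.length : Int) - 1)).getD 0
                then nm ++ [e] else nm)) from rfl]
    rw [hdups_eq, hlen, hstep,
      show stepB (cnt, dups) e
          = (cnt.insert e (cnt.getD e 0 + 1), if cnt.getD e 0 + 1 = 2 then dups ++ [e] else dups)
        from rfl]
    -- nm component
    rcases List.eq_nil_or_concat p with hp | ⟨q, a, hp⟩
    · subst hp
      simp [nmRest]
    · subst hp
      simp only [List.concat_eq_append]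
      have hget : PySem.List.pyGet? ((q ++ [a]) ++ [e] ++ t) (((q ++ [a]).length : Int) - 1)
          = some a := by
        have h1 : (q ++ [a]) ++ [e] ++ t = q ++ (a :: e :: t) := by simp
        have h2 : (((q ++ [a]).length : Nat) : Int) - 1 = ((q.length : Nat) : Int) := by simp
        rw [h1, h2, PySem.List.pyGet?_append_length]
      have hpos : 0 < (((q ++ [a]).length : Nat) : Int) := by
        have : 0 < (q ++ [a]).length := by simp
        exact_mod_cast this
      have hlast : (q ++ [a]).getLast? = some a := List.getLast?_concat
      have hlast' : ((q ++ [a]) ++ [e]).getLast? = some e := List.getLast?_concat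
      rw [hget, hlast, hlast']
      simp only [Option.getD_some, hpos, true_and, nmRest]
      by_cases he : e ≤ a <;> simp [he]

-- strictly increasing run: the head is at most the last element
theorem head_le_getLast : ∀ (t : List Int) (b : Int), (b :: t).Pairwise (· < ·) →
    b ≤ (b :: t).getLast (by simp) := by
  intro t
  induction t with
  | nil => intro b _; simp
  | cons c t' ih =>
    intro b h
    rw [List.pairwise_cons] at h
    have hbc : b < c := h.1 c (by simp)
    have := ih c h.2
    simpa [List.getLast_cons] using le_trans (le_of_lt hbc) this

-- the range-filter over [head, last] of a strictly sorted list equals the concatenation of its gaps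
theorem gaps : ∀ (t : List Int) (a : Int), (a :: t).Pairwise (· < ·) →
    (PySem.List.pyRange a ((a :: t).getLast (by simp) + 1) 1).filter
        (fun e => decide (e ∉ a :: t))
      = ((a :: t).zip t).flatMap (fun q => PySem.List.pyRange (q.1 + 1) q.2 1) := by
  intro t
  induction t with
  | nil =>
    intro a _
    rw [show (([a] : List Int).getLast (by simp)) = a from rfl]
    rw [PySem.List.pyRange_one_cons (by omega : a < a + 1)]
    simp [pysem]
  | cons b t' ih =>
    intro a h
    have hpw := h
    rw [List.pairwise_cons] at h
    have hab : a < b := h.1 b (by simp)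
    have hbt : ∀ x ∈ t', b < x := (List.pairwise_cons.mp h.2).1
    have hlast : (a :: b :: t').getLast (by simp) = (b :: t').getLast (by simp) := by
      simp [List.getLast_cons]
    have hble : b ≤ (b :: t').getLast (by simp) := head_le_getLast t' b h.2
    rw [hlast,
      PySem.List.pyRange_one_append a b ((b :: t').getLast (by simp) + 1)
        (le_of_lt hab) (by omega),
      List.filter_append]
    -- left chunk: a is dropped, everything strictly between a and b stays
    have hleft : (PySem.List.pyRange a b 1).filter (fun e => decide (e ∉ a :: b :: t'))
        = PySem.List.pyRange (a + 1) b 1 := by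
      rw [PySem.List.pyRange_one_cons hab, List.filter_cons]
      have ha : (decide (a ∉ a :: b :: t')) = false := by simp
      rw [ha]
      simp only [Bool.false_eq_true, if_false]
      apply List.filter_eq_self.mpr
      intro e he
      have hr := PySem.List.mem_pyRange_one.mp he
      have : e ∉ a :: b :: t' := by
        simp only [List.mem_cons]
        push Not
        exact ⟨by omega, by omega, fun hx => absurd (hbt e hx) (by omega)⟩
      simpa using this
    -- right chunk: a can no longer occur, so the filter predicate coincides with the tail's
    have hright : (PySem.List.pyRange b ((b :: t').getLast (by simp) + 1) 1).filter
          (fun e => decide (e ∉ a :: b :: t'))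
        = (PySem.List.pyRange b ((b :: t').getLast (by simp) + 1) 1).filter
          (fun e => decide (e ∉ b :: t')) := by
      apply List.filter_congr
      intro e he
      have hr := PySem.List.mem_pyRange_one.mp he
      have hne : e ≠ a := by omega
      simp [hne]
    rw [hleft, hright, ih b h.2]
    simp [List.zip_cons_cons]

-- membership in the sorted distinct list is membership in the input
theorem mem_sorted_ofList (xs : List Int) (k : Int) :
    k ∈ PySem.List.sorted (PySem.Set.ofList xs) (fun x => x) false ↔ k ∈ xs := by
  rw [(PySem.List.sorted_perm (PySem.Set.ofList xs) (fun x => x) false).mem_iff]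
  exact PySem.Set.mem_ofList xs k

theorem sorted_ofList_pairwise_lt (xs : List Int) :
    (PySem.List.sorted (PySem.Set.ofList xs) (fun x => x) false).Pairwise (· < ·) := by
  have hle : (PySem.List.sorted (PySem.Set.ofList xs) (fun x => x) false).Pairwise (· ≤ ·) :=
    PySem.List.sorted_pairwise (PySem.Set.ofList xs) (fun x => x)
  have hnd : (PySem.List.sorted (PySem.Set.ofList xs) (fun x => x) false).Nodup :=
    (PySem.List.sorted_perm (PySem.Set.ofList xs) (fun x => x) false).nodup_iff.mpr
      (PySem.Set.nodup_ofList xs)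
  exact (hle.and hnd).imp (fun h => lt_of_le_of_ne h.1 h.2)

-- the two holes computations agree
theorem holes_eq (xs : List Int) :
    (if PySem.List.sorted (PySem.Set.ofList xs) (fun x => x) false ≠ [] then
      (PySem.List.pyRange
          ((PySem.List.pyGet? (PySem.List.sorted (PySem.Set.ofList xs) (fun x => x) false) 0).getD 0)
          (((PySem.List.pyGet? (PySem.List.sorted (PySem.Set.ofList xs) (fun x => x) false)
              (-1)).getD 0) + 1) 1).foldl
        (fun acc expected => if expected ∈ PySem.Set.ofList xs then acc else acc ++ [expected]) []
    else [])
    = ((PySem.List.sorted (PySem.Set.ofList xs) (fun x => x) false).zip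
        (PySem.List.slice (PySem.List.sorted (PySem.Set.ofList xs) (fun x => x) false)
          (some 1) none)).foldl
        (fun acc q => acc ++ PySem.List.pyRange (q.1 + 1) q.2 1) [] := by
  rw [PySem.List.slice_from_one, PySem.List.foldl_append_eq_flatMap]
  cases hu : PySem.List.sorted (PySem.Set.ofList xs) (fun x => x) false with
  | nil => simp
  | cons a t =>
    have hpw : (a :: t).Pairwise (· < ·) := by rw [← hu]; exact sorted_ofList_pairwise_lt xs
    have hmem : ∀ k : Int, k ∈ (a :: t) ↔ k ∈ xs := by
      intro k; rw [← hu]; exact mem_sorted_ofList xs k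
    simp only [ne_eq, reduceCtorEq, not_false_eq_true, if_true, List.tail_cons]
    rw [show PySem.List.pyGet? (a :: t) 0 = some a from PySem.List.pyGet?_zero_cons a t,
        PySem.List.pyGet?_neg_one]
    have hlast : (a :: t).getLast? = some ((a :: t).getLast (by simp)) := by
      simp [List.getLast?_eq_some_getLast]
    rw [hlast]
    simp only [Option.getD_some]
    have hswap : (fun (acc : List Int) (expected : Int) =>
          if expected ∈ PySem.Set.ofList xs then acc else acc ++ [expected])
        = (fun (acc : List Int) (expected : Int) =>
          if expected ∉ (a :: t) then acc ++ [expected] else acc) := by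
      funext acc e
      by_cases h : e ∈ xs
      · simp [PySem.Set.mem_ofList, h, (hmem e).mpr h]
      · have : e ∉ (a :: t) := fun hx => h ((hmem e).mp hx)
        simp [PySem.Set.mem_ofList, h, this]
    rw [hswap, PySem.List.foldl_append_ite_eq_filter (fun e => e ∉ (a :: t))]
    rw [List.nil_append]
    exact gaps t a hpw

-- ===== VERDICT (by name: the statement is the Claim_ definition above) =====
theorem analyze_external_ids_py_spec : Claim_equal_analyze_external_ids_py := by
  intro xs _
  show analyze_external_ids_py xs = analyze_external_ids_py_alt xs
  have hloop := loop_split xs [] PySem.Dict.empty [] [] PySem.Dict.empty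
    (by intro k; simp) (by intro k; simp) (by intro k; simp)
  simp only [List.nil_append, List.length_nil, Nat.cast_zero, List.getLast?_nil] at hloop
  simp only [analyze_external_ids_py, analyze_external_ids_py_alt]
  rw [hloop, holes_eq xs]
  simp only [PySem.List.slice_from_one]
  rw [nmRest_none]
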